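-- pv_equiv track=rewrite | github.com/MCTian-mi/2024spring-cs201 | assignment/py/Find The Multiple.py | bfs
-- ===== SOURCE A (Python) =====
-- def bfs(x:int, l:list=[1]):
--     for y in l:
--         if y % x == 0:
--             return y
--     l2 = []
--     for y in l:
--         l2.append(10*y + 0)
--         l2.append(10*y + 1)
--     return bfs(x, l2)
-- ===== SOURCE B (Python) =====
-- def bfs(x: int, l: list = [1]):
--     # Level k of A's search consists of y*10**k + d, with y running over l and
--     # d over the 2**k suffix values (0/1 digit strings of length k) in counting
--     # order.  The suffix values are shared across all y, so B maintains only
--     # that suffix table and combines it with each y arithmetically, instead of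
--     # A's recursion which re-materialises len(l)*2**k full candidates per level.
--     p = 1          # 10**k
--     suf = [0]      # suffix values for the current k, in counting order
--     while True:
--         for y in l:
--             yp = y * p
--             for d in suf:
--                 n = yp + d
--                 if n % x == 0:
--                     return n
--         suf = [10 * d + e for d in suf for e in (0, 1)]
--         p *= 10
-- ===== Notes on version B (the rewrite author's own statement) =====
-- stated objective: alternative
-- what changed: Replaces A's recursive doubling of the full candidate list with an iteration that keeps only the 2^k suffix values of the current level (one table shared by every seed y in l) and forms each candidate arithmetically as y*10**k + d, so per level it builds 2^k values instead of len(l)*2^k full candidates.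
import Mathlib
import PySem

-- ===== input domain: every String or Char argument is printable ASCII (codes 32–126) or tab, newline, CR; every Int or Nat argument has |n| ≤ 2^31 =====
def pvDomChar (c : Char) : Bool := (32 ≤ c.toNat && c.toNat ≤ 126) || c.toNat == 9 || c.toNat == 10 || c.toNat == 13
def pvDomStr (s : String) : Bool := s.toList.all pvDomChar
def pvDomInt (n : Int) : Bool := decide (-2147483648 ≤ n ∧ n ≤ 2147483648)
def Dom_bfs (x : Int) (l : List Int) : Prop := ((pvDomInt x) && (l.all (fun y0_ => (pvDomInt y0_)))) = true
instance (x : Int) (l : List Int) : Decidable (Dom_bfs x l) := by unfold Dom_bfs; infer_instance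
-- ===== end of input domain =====

-- B keeps only the table of 0/1 suffix values of the current level, shared by
-- every y in l, and forms each candidate arithmetically as y*10^k + d, instead
-- of A's recursion which re-materialises all len(l)*2^k candidates per level
-- (objective: alternative). Both loops are ported with a fuel counter that
-- merely makes the (semantically unbounded) search total.

-- ===== PORT A =====
-- 'for y in l: if y % x == 0: return y' (first match, Python floor mod)
def bfsLoop1 (x : Int) : List Int → Option Int
  | [] => none
  | y :: ys => if PySem.Int.mod y x = 0 then some y else bfsLoop1 x ys

-- 'l2 = []; for y in l: l2.append(10*y + 0); l2.append(10*y + 1)'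
-- (the loop appends exactly the two children of each y in order; rendered as
--  flatMap so that building the level is linear, producing the same list)
def bfsLevel (l : List Int) : List Int :=
  l.flatMap (fun y => [10 * y + 0, 10 * y + 1])

-- the recursion 'return bfs(x, l2)', guarded by fuel (totality only)
def bfsGo : Nat → Int → List Int → Int
  | 0, _, _ => 0
  | f + 1, x, l =>
    match bfsLoop1 x l with
    | some y => y
    | none => bfsGo f x (bfsLevel l)

def bfs (x : Int) (l : List Int) : Int :=
  bfsGo (x.natAbs * x.natAbs + 100) x l

-- ===== PORT B =====
-- 'for d in suf: n = yp + d; if n % x == 0: return n'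
def bfsAltScanD (x yp : Int) : List Int → Option Int
  | [] => none
  | d :: ds =>
    let n := yp + d
    if PySem.Int.mod n x = 0 then some n else bfsAltScanD x yp ds

-- 'for y in l: yp = y * p; …'
def bfsAltScanY (x p : Int) (suf : List Int) : List Int → Option Int
  | [] => none
  | y :: ys =>
    match bfsAltScanD x (y * p) suf with
    | some n => some n
    | none => bfsAltScanY x p suf ys

-- 'suf = [10 * d + e for d in suf for e in (0, 1)]'
def bfsAltNext (suf : List Int) : List Int :=
  suf.flatMap (fun d => [10 * d + 0, 10 * d + 1])

-- 'while True: … p *= 10', guarded by fuel (totality only)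
def bfsAltGo : Nat → Int → List Int → List Int → Int → Int
  | 0, _, _, _, _ => 0
  | f + 1, x, l, suf, p =>
    match bfsAltScanY x p suf l with
    | some n => n
    | none => bfsAltGo f x l (bfsAltNext suf) (p * 10)

def bfs_alt (x : Int) (l : List Int) : Int :=
  bfsAltGo (x.natAbs * x.natAbs + 100) x l [0] 1

-- ===== PRECONDITION & SPEC =====
-- Pre_ excludes exactly the inputs on which Python A never returns: x = 0
-- (ZeroDivisionError on the first candidate) and l = [] (unbounded recursion).
def Pre_bfs (x : Int) (l : List Int) : Prop := x ≠ 0 ∧ l ≠ []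
instance (x : Int) (l : List Int) : Decidable (Pre_bfs x l) := by unfold Pre_bfs; infer_instance
def pvWitness_bfs : Int × List Int := (7, [1])

def Spec_bfs (x : Int) (l : List Int) (out : Int) : Prop := out = bfs_alt x l
instance (x : Int) (l : List Int) (out : Int) : Decidable (Spec_bfs x l out) := by unfold Spec_bfs; infer_instance

-- ===== CLAIM (what is proved, stated in full; the proofs are below) =====
def Claim_equal_bfs : Prop := ∀ (x : Int) (l : List Int), Dom_bfs x l → Pre_bfs x l → Spec_bfs x l (bfs x l)

-- ===== LEMMAS AND PROOFS =====

-- the level list A scans, expressed through B's suffix table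
def levelS (suf l : List Int) (p : Int) : List Int :=
  l.flatMap (fun y => suf.map (fun d => y * p + d))

theorem bfsLoop1_append (x : Int) (as bs : List Int) :
    bfsLoop1 x (as ++ bs) = (bfsLoop1 x as).orElse (fun _ => bfsLoop1 x bs) := by
  induction as with
  | nil => simp [bfsLoop1]
  | cons a as ih =>
    simp only [List.cons_append, bfsLoop1]
    split <;> simp [ih]

theorem scanD_eq_loop1 (x yp : Int) (suf : List Int) :
    bfsAltScanD x yp suf = bfsLoop1 x (suf.map (fun d => yp + d)) := by
  induction suf with
  | nil => rfl
  | cons d ds ih => simp only [bfsAltScanD, List.map_cons, bfsLoop1, ih]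

theorem scanY_eq_loop1 (x p : Int) (suf l : List Int) :
    bfsAltScanY x p suf l = bfsLoop1 x (levelS suf l p) := by
  induction l with
  | nil => rfl
  | cons y ys ih =>
    rw [bfsAltScanY, scanD_eq_loop1]
    have : levelS suf (y :: ys) p =
        (suf.map (fun d => y * p + d)) ++ levelS suf ys p := by simp [levelS]
    rw [this, bfsLoop1_append, ih]
    cases bfsLoop1 x (suf.map (fun d => y * p + d)) <;> simp

theorem bfsLevel_levelS (suf l : List Int) (p : Int) :
    bfsLevel (levelS suf l p) = levelS (bfsAltNext suf) l (p * 10) := by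
  unfold bfsLevel levelS bfsAltNext
  rw [List.flatMap_assoc]
  congr 1; funext y
  rw [List.flatMap_map, List.map_flatMap]
  congr 1; funext d
  simp only [List.map_cons, List.map_nil, List.cons.injEq, and_true]
  exact ⟨by ring, by ring⟩

theorem go_eq_altGo (f : Nat) (x : Int) (l suf : List Int) (p : Int) :
    bfsGo f x (levelS suf l p) = bfsAltGo f x l suf p := by
  induction f generalizing suf p with
  | zero => rfl
  | succ f ih =>
    rw [bfsGo, bfsAltGo, scanY_eq_loop1]
    cases bfsLoop1 x (levelS suf l p) with
    | some y => rfl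
    | none => rw [bfsLevel_levelS, ih]

theorem levelS_init (l : List Int) : levelS [0] l 1 = l := by
  simp [levelS]

-- ===== VERDICT (by name: the statement is the Claim_ definition above) =====
theorem bfs_spec : Claim_equal_bfs := by
  intro x l _ _
  unfold Spec_bfs bfs bfs_alt
  rw [← go_eq_altGo, levelS_init]
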